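-- pv_equiv track=rewrite | github.com/msparsa/splicing | experiments/encode_datafile.py | build_label_string
-- ===== SOURCE A (Python) =====
-- def build_label_string(sense_len: int, donors: list[int], acceptors: list[int]) -> str:
--     arr = ["0"] * sense_len
--     for a in acceptors:
--         if 0 <= a < sense_len:
--             arr[a] = "1"
--     for d in donors:
--         if 0 <= d < sense_len:
--             arr[d] = "2"
--     return "".join(arr)
-- ===== SOURCE B (Python) =====
-- def build_label_string(sense_len: int, donors: list[int], acceptors: list[int]) -> str:
--     donor_set = set(donors)
--     acc_set = set(acceptors)
--     return "".join(
--         "2" if i in donor_set else "1" if i in acc_set else "0"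
--         for i in range(sense_len)
--     )
-- ===== Notes on version B (the rewrite author's own statement) =====
-- stated objective: idiomatic
-- what changed: Instead of scattering marks into a mutable array by looping over the acceptor and donor lists, B scans every position once and queries two prebuilt sets (donor first to keep precedence), joining a generator directly.
import Mathlib
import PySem

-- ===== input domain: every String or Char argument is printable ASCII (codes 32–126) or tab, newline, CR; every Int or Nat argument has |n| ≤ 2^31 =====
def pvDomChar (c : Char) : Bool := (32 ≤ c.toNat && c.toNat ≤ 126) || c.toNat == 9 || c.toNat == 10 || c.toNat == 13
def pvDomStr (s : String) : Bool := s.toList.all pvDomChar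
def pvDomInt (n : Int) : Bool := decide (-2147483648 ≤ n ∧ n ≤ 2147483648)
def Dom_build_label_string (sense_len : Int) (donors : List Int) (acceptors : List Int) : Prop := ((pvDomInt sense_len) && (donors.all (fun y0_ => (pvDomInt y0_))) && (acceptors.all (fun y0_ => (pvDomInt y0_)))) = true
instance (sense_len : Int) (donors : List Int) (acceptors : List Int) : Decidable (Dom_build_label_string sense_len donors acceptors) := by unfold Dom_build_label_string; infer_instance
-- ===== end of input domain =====

-- B scans positions once and queries two prebuilt sets (donor checked first) instead of
-- scattering marks into a mutable array by looping over the mark lists; objective: idiomatic.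

-- ===== PORT A =====
-- one pass of marking: for x in ps: if 0 <= x < sense_len: arr[x] = c
def markPass (sense_len : Int) (c : Char) (ps : List Int) (arr : List Char) : List Char :=
  ps.foldl (fun arr x => if 0 ≤ x ∧ x < sense_len then arr.set x.toNat c else arr) arr

def build_label_string (sense_len : Int) (donors : List Int) (acceptors : List Int) : String :=
  let arr := List.replicate sense_len.toNat '0'
  let arr := markPass sense_len '1' acceptors arr
  let arr := markPass sense_len '2' donors arr
  String.mk arr

-- ===== PORT B =====
def build_label_string_alt (sense_len : Int) (donors : List Int) (acceptors : List Int) : String :=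
  let donor_set : PySem.Set Int := PySem.Set.ofList donors
  let acc_set : PySem.Set Int := PySem.Set.ofList acceptors
  String.mk <| (List.range sense_len.toNat).map fun (i : Nat) =>
    if PySem.Set.contains donor_set (i : Int) then '2'
    else if PySem.Set.contains acc_set (i : Int) then '1'
    else '0'

-- ===== PRECONDITION & SPEC =====
def Spec_build_label_string (sense_len : Int) (donors : List Int) (acceptors : List Int) (out : String) : Prop := out = build_label_string_alt sense_len donors acceptors
instance (sense_len : Int) (donors : List Int) (acceptors : List Int) (out : String) : Decidable (Spec_build_label_string sense_len donors acceptors out) := by unfold Spec_build_label_string; infer_instance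

-- ===== CLAIM (what is proved, stated in full; the proofs are below) =====
def Claim_equal_build_label_string : Prop := ∀ (sense_len : Int) (donors : List Int) (acceptors : List Int), Dom_build_label_string sense_len donors acceptors → Spec_build_label_string sense_len donors acceptors (build_label_string sense_len donors acceptors)

-- ===== LEMMAS AND PROOFS =====

theorem length_markPass (n : Int) (c : Char) (ps : List Int) (arr : List Char) :
    (markPass n c ps arr).length = arr.length := by
  induction ps generalizing arr with
  | nil => rfl
  | cons x ps ih =>
    simp only [markPass, List.foldl_cons] at *
    rw [ih]
    split <;> simp

theorem getElem?_markPass (n : Int) (c : Char) (ps : List Int) (arr : List Char)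
    (hlen : (arr.length : Int) = n) (i : Nat) (hi : i < arr.length) :
    (markPass n c ps arr)[i]? = if (i : Int) ∈ ps then some c else arr[i]? := by
  induction ps generalizing arr with
  | nil => simp [markPass]
  | cons x ps ih =>
    simp only [markPass, List.foldl_cons]
    by_cases hx : 0 ≤ x ∧ x < n
    · rw [if_pos hx]
      have hset : (arr.set x.toNat c).length = arr.length := by simp
      rw [show List.foldl (fun arr x => if 0 ≤ x ∧ x < n then arr.set x.toNat c else arr)
            (arr.set x.toNat c) ps = markPass n c ps (arr.set x.toNat c) from rfl]
      rw [ih (arr.set x.toNat c) (by simpa [hset]) (by omega)]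
      by_cases hmem : (i : Int) ∈ ps
      · simp [hmem]
      · have hxlt : x.toNat < arr.length := by omega
        by_cases hxi : x = (i : Int)
        · have hti : x.toNat = i := by omega
          rw [hti]; simp [hmem, hxi, hi]
        · have hne : x.toNat ≠ i := by omega
          have hxi' : (i : Int) ≠ x := fun h => hxi h.symm
          simp [hmem, hxi', List.getElem?_set_ne hne]
    · rw [if_neg hx]
      rw [show List.foldl (fun arr x => if 0 ≤ x ∧ x < n then arr.set x.toNat c else arr)
            arr ps = markPass n c ps arr from rfl]
      rw [ih arr hlen hi]
      by_cases hmem : (i : Int) ∈ ps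
      · simp [hmem]
      · have hxi : (i : Int) ≠ x := by
          intro h; rw [← h] at hx; exact hx ⟨Int.natCast_nonneg i, by omega⟩
        simp [hmem, hxi]

theorem build_label_string_spec : Claim_equal_build_label_string := by
  intro n donors acceptors _
  unfold Spec_build_label_string build_label_string build_label_string_alt
  apply congrArg String.mk
  apply List.ext_getElem?
  intro i
  have hlen0 : (List.replicate n.toNat '0').length = n.toNat := by simp
  by_cases hiN : i < n.toNat
  · have hln : ((List.replicate n.toNat '0').length : Int) = n := by
      simp [hlen0]; omega
    have h1 : i < (markPass n '1' acceptors (List.replicate n.toNat '0')).length := by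
      simp [length_markPass, hlen0, hiN]
    rw [getElem?_markPass n '2' donors _ (by simp [length_markPass, hlen0]; omega) i h1]
    rw [getElem?_markPass n '1' acceptors _ hln i (by simp [hlen0, hiN])]
    simp only [List.getElem?_map, List.getElem?_range, hiN, Option.map_some]
    by_cases hd : (i : Int) ∈ donors
    · simp [hd]
    · by_cases ha : (i : Int) ∈ acceptors
      · simp [hd, ha]
      · simp [hd, ha, hiN]
  · have : (markPass n '2' donors (markPass n '1' acceptors (List.replicate n.toNat '0'))).length ≤ i := by
      simp [length_markPass, hlen0]; omega
    rw [List.getElem?_eq_none this, List.getElem?_eq_none (by simp; omega)]
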